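-- pv_equiv track=rewrite | github.com/jee-in/algorithm | PYTHON/BOJ/0047_두 용액_2470/2740_20250106_sorting.py | find_closest_to_zero
-- ===== SOURCE A (Python) =====
-- def find_closest_to_zero(liquids):
--   liquids.sort(key = abs)
--
--   diff = []
--   for i in range(1, len(liquids)):
--     temp_abs = abs(liquids[i] + liquids[i - 1])
--     diff.append((temp_abs, (i, i - 1)))
--
--   diff.sort(key = lambda x: x[0])
--   indexes = diff[0][1]
--
--   return sorted((liquids[indexes[0]], liquids[indexes[1]]))
-- ===== SOURCE B (Python) =====
-- def find_closest_to_zero(liquids):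
--   liquids.sort(key=abs)
--   best_abs = abs(liquids[1] + liquids[0])
--   best_pair = (liquids[1], liquids[0])
--   for i in range(2, len(liquids)):
--     cur = abs(liquids[i] + liquids[i - 1])
--     if cur < best_abs:
--       best_abs = cur
--       best_pair = (liquids[i], liquids[i - 1])
--   return sorted(best_pair)
-- ===== Notes on version B (the rewrite author's own statement) =====
-- stated objective: faster
-- what changed: Replaces A's building of a full diff list of (abs-sum, index-pair) tuples followed by a second stable sort and taking its head with a single linear min-scan over adjacent pairs of the abs-sorted list, keeping the pair values directly.
import Mathlib
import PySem

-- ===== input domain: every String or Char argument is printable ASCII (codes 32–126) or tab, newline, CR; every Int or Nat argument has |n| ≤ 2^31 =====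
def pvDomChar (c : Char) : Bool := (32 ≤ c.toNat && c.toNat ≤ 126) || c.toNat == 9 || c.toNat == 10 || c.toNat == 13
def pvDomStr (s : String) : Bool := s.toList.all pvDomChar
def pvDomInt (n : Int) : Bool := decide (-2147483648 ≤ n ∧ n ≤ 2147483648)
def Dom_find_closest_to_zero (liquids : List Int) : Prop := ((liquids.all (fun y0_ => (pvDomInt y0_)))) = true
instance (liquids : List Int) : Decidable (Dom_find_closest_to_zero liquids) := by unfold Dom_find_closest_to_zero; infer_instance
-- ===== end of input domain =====

-- B replaces A's build-a-diff-list-then-sort-it selection by a single linear min-scan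
-- over adjacent pairs of the abs-sorted list (objective: faster; a timing run measured B faster).
-- Note: A sorts `liquids` in place; B performs the same in-place sort; the equivalence
-- proved here is about the return value.

-- ===== PORT A =====
def find_closest_to_zero (liquids : List Int) : List Int :=
  let s := PySem.List.sorted liquids (fun x => |x|) false
  let diff := (PySem.List.pyRange 1 (s.length : Int) 1).foldl
      (fun acc i =>
        acc ++ [(|PySem.List.pyGetD s i 0 + PySem.List.pyGetD s (i - 1) 0|, (i, i - 1))]) []
  let sortedDiff := PySem.List.sorted diff (fun x => x.1) false
  match sortedDiff.head? with   -- diff[0]: IndexError (none) iff diff = [], excluded by Pre_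
  | some d =>
      PySem.List.sorted [PySem.List.pyGetD s d.2.1 0, PySem.List.pyGetD s d.2.2 0]
        (fun v => v) false
  | none => []

-- ===== PORT B =====
def find_closest_to_zero_alt (liquids : List Int) : List Int :=
  let s := PySem.List.sorted liquids (fun x => |x|) false
  let init : Int × (Int × Int) :=
    (|PySem.List.pyGetD s 1 0 + PySem.List.pyGetD s 0 0|,
     (PySem.List.pyGetD s 1 0, PySem.List.pyGetD s 0 0))
  let best := (PySem.List.pyRange 2 (s.length : Int) 1).foldl
      (fun b i =>
        let cur := |PySem.List.pyGetD s i 0 + PySem.List.pyGetD s (i - 1) 0|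
        if cur < b.1 then (cur, (PySem.List.pyGetD s i 0, PySem.List.pyGetD s (i - 1) 0)) else b)
      init
  PySem.List.sorted [best.2.1, best.2.2] (fun v => v) false

-- ===== PRECONDITION & SPEC =====
-- Pre_ excludes lists of fewer than two elements, on which A raises IndexError (diff[0]).
def Pre_find_closest_to_zero (liquids : List Int) : Prop := 2 ≤ liquids.length
instance (liquids : List Int) : Decidable (Pre_find_closest_to_zero liquids) := by
  unfold Pre_find_closest_to_zero; infer_instance
def pvWitness_find_closest_to_zero : List Int := [3, -5]

def Spec_find_closest_to_zero (liquids : List Int) (out : List Int) : Prop :=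
  out = find_closest_to_zero_alt liquids
instance (liquids : List Int) (out : List Int) : Decidable (Spec_find_closest_to_zero liquids out) := by
  unfold Spec_find_closest_to_zero; infer_instance

-- ===== CLAIM (what is proved, stated in full; the proofs are below) =====
def Claim_equal_find_closest_to_zero : Prop :=
  ∀ (liquids : List Int), Dom_find_closest_to_zero liquids →
    Pre_find_closest_to_zero liquids →
    Spec_find_closest_to_zero liquids (find_closest_to_zero liquids)

-- ===== LEMMAS AND PROOFS =====

-- head of a stable insert
theorem insertBy_head? {α : Type} (lt : α → α → Bool) (x : α) (acc : List α) :
    (PySem.List.insertBy lt x acc).head? =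
      some (match acc with | [] => x | h :: _ => if lt x h then x else h) := by
  cases acc with
  | nil => simp [PySem.List.insertBy]
  | cons h t =>
    simp only [PySem.List.insertBy]
    split <;> simp_all

-- head of a fold of stable inserts is the first-argmin fold
theorem foldl_insertBy_head? {α : Type} (lt : α → α → Bool) (xs : List α) (acc : List α) :
    (xs.foldl (fun a x => PySem.List.insertBy lt x a) acc).head? =
      xs.foldl
        (fun (o : Option α) x =>
          match o with
          | none => some x
          | some m => if lt x m then some x else some m)
        acc.head? := by
  induction xs generalizing acc with
  | nil => rfl
  | cons x t ih =>
    simp only [List.foldl_cons]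
    rw [ih, insertBy_head?]
    cases acc with
    | nil => rfl
    | cons h hs =>
      by_cases hlt : lt x h = true <;> simp [hlt]

-- head of Python's stable sort = Python's min (first extremal element)
theorem head?_sorted_eq_min? {α κ : Type} [LinearOrder κ] (xs : List α) (key : α → κ) :
    (PySem.List.sorted xs key false).head? = PySem.List.min? xs key := by
  unfold PySem.List.sorted PySem.List.min?
  simp only [if_neg (by decide : ¬ (false = true))]
  rw [foldl_insertBy_head? (fun a b => decide (key a < key b)) xs []]
  simp only [List.head?_nil]
  congr 1
  funext o x
  cases o with
  | none => rfl
  | some m => by_cases h : key x < key m <;> simp [h]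

-- min? of a nonempty list as a running strict-< fold
theorem foldl_min_some {α κ : Type} [LinearOrder κ] (key : α → κ) (t : List α) (m : α) :
    t.foldl
        (fun (o : Option α) x =>
          match o with
          | none => some x
          | some m => if key x < key m then some x else some m)
        (some m) =
      some (t.foldl (fun b x => if key x < key b then x else b) m) := by
  induction t generalizing m with
  | nil => rfl
  | cons x t ih =>
    simp only [List.foldl_cons]
    by_cases h : key x < key m <;> simp [h, ih]

theorem min?_cons {α κ : Type} [LinearOrder κ] (key : α → κ) (x : α) (t : List α) :
    PySem.List.min? (x :: t) key =
      some (t.foldl (fun b y => if key y < key b then y else b) x) := by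
  unfold PySem.List.min?
  simp only [List.foldl_cons]
  exact foldl_min_some key t x

-- the two folds run in lockstep through the projection G
theorem fold_lockstep (s : List Int) (r : List Int) (st : Int × (Int × Int)) :
    (r.foldl
      (fun b i =>
        let cur := |PySem.List.pyGetD s i 0 + PySem.List.pyGetD s (i - 1) 0|
        if cur < b.1 then (cur, (PySem.List.pyGetD s i 0, PySem.List.pyGetD s (i - 1) 0)) else b)
      (st.1, (PySem.List.pyGetD s st.2.1 0, PySem.List.pyGetD s st.2.2 0))) =
    (fun m : Int × (Int × Int) => (m.1, (PySem.List.pyGetD s m.2.1 0, PySem.List.pyGetD s m.2.2 0)))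
      (r.foldl
        (fun m i =>
          if |PySem.List.pyGetD s i 0 + PySem.List.pyGetD s (i - 1) 0| < m.1 then
            (|PySem.List.pyGetD s i 0 + PySem.List.pyGetD s (i - 1) 0|, (i, i - 1))
          else m)
        st) := by
  induction r generalizing st with
  | nil => rfl
  | cons i t ih =>
    simp only [List.foldl_cons]
    by_cases h : |PySem.List.pyGetD s i 0 + PySem.List.pyGetD s (i - 1) 0| < st.1
    · simpa [h] using ih (|PySem.List.pyGetD s i 0 + PySem.List.pyGetD s (i - 1) 0|, (i, i - 1))
    · simpa [h] using ih st

-- ===== VERDICT (by name: the statement is the Claim_ definition above) =====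
theorem find_closest_to_zero_spec : Claim_equal_find_closest_to_zero := by
  intro liquids _ hpre
  unfold Spec_find_closest_to_zero find_closest_to_zero find_closest_to_zero_alt
  set s := PySem.List.sorted liquids (fun x => |x|) false with hs
  have hlen : s.length = liquids.length := PySem.List.length_sorted ..
  have hn : (1 : Int) < (s.length : Int) := by
    have : 2 ≤ liquids.length := hpre
    omega
  -- the diff list is a map over the index range
  simp only [PySem.List.foldl_append_singleton_eq_map, List.nil_append]
  rw [head?_sorted_eq_min?]
  rw [PySem.List.pyRange_one_cons hn, List.map_cons, min?_cons]
  rw [List.foldl_map]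
  have := fold_lockstep s (PySem.List.pyRange (1 + 1) (s.length : Int) 1)
      (|PySem.List.pyGetD s 1 0 + PySem.List.pyGetD s (1 - 1) 0|, (1, 1 - 1))
  simp only at this ⊢
  norm_num at this ⊢
  rw [this]
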